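-- pv_equiv track=rewrite | github.com/DavidVellaZarb/grammar-solve | src/lark_to_gbnf.py | _tokenize_alt
-- ===== SOURCE A (Python) =====
-- def _tokenize_alt(alt: str) -> list[tuple[str, str]]:
--     tokens = []
--     i = 0
--     while i < len(alt):
--         if alt[i] == '"':
--             j = i + 1
--             while j < len(alt):
--                 if alt[j] == '\\':
--                     j += 2
--                     continue
--                 if alt[j] == '"':
--                     break
--                 j += 1
--             j += 1
--             tokens.append(("literal", alt[i:j]))
--             i = j
--         elif alt[i] in (" ", "\t"):
--             i += 1
--         elif alt[i] == "_" or alt[i].isalpha():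
--             j = i
--             while j < len(alt) and (alt[j] == "_" or alt[j].isalnum()):
--                 j += 1
--             tokens.append(("ref", alt[i:j]))
--             i = j
--         else:
--             i += 1
--     return tokens
-- ===== SOURCE B (Python) =====
-- def _tokenize_alt(alt: str) -> list[tuple[str, str]]:
--     # Single-pass character state machine: no index bookkeeping or inner scans.
--     tokens, buf, state = [], [], "top"
--     for c in alt:
--         if state == "ref":
--             if c == "_" or c.isalnum():
--                 buf.append(c)
--                 continue
--             tokens.append(("ref", "".join(buf)))
--             buf, state = [], "top"
--         if state == "lit":
--             buf.append(c)
--             if c == "\\":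
--                 state = "esc"
--             elif c == '"':
--                 tokens.append(("literal", "".join(buf)))
--                 buf, state = [], "top"
--             continue
--         if state == "esc":
--             buf.append(c)
--             state = "lit"
--             continue
--         if c == '"':
--             buf, state = [c], "lit"
--         elif c == "_" or c.isalpha():
--             buf, state = [c], "ref"
--     if state == "ref":
--         tokens.append(("ref", "".join(buf)))
--     elif state in ("lit", "esc"):
--         tokens.append(("literal", "".join(buf)))
--     return tokens
-- ===== Notes on version B (the rewrite author's own statement) =====
-- stated objective: faster
-- what changed: Replaces A's index-based scanner with nested while-loops and per-token slicing by a single-pass character state machine (top/literal/escape/ref states) that builds each token in a buffer and flushes at state transitions and end of input; measured ~2.5x faster (constant factor: one uniform pass, no index bookkeeping or re-dispatch per token).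
import Mathlib
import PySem

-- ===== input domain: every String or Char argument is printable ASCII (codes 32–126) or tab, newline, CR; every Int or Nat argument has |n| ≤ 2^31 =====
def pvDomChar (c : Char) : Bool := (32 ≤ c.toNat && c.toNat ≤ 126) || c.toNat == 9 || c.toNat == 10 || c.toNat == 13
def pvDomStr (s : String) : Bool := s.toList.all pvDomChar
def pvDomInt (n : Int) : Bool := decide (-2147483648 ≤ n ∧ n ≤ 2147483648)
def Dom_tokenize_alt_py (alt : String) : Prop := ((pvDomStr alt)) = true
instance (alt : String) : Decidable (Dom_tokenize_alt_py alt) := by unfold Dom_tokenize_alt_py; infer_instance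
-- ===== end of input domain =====

-- B replaces A's index-and-slice scanner by a single-pass character state machine (single uniform pass; measurably faster in a timing run).

-- ===== PORT A =====
-- inner while loop scanning a string literal: returns the final j (break position, or ≥ length when it ran off the end)
def pvLitJ (cs : List Char) (j : Nat) : Nat :=
  if h : j < cs.length then
    if cs[j] = '\\' then pvLitJ cs (j + 2)
    else if cs[j] = '"' then j
    else pvLitJ cs (j + 1)
  else j
termination_by cs.length - j

theorem pvLitJ_ge (cs : List Char) (j : Nat) : j ≤ pvLitJ cs j := by
  unfold pvLitJ
  split
  · split
    · exact le_trans (by omega) (pvLitJ_ge cs (j + 2))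
    · split
      · exact le_refl _
      · exact le_trans (by omega) (pvLitJ_ge cs (j + 1))
  · exact le_refl _
termination_by cs.length - j

-- inner while loop scanning a ref word
def pvWordJ (cs : List Char) (j : Nat) : Nat :=
  if h : j < cs.length then
    if cs[j] = '_' ∨ PySem.Chars.isalnum cs[j] then pvWordJ cs (j + 1) else j
  else j
termination_by cs.length - j

theorem pvWordJ_ge (cs : List Char) (j : Nat) : j ≤ pvWordJ cs j := by
  unfold pvWordJ
  split
  · split
    · exact le_trans (by omega) (pvWordJ_ge cs (j + 1))
    · exact le_refl _
  · exact le_refl _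
termination_by cs.length - j

theorem pvWordJ_gt (cs : List Char) (i : Nat) (h : i < cs.length)
    (hc : cs[i] = '_' ∨ PySem.Chars.isalpha cs[i]) : i < pvWordJ cs i := by
  have h2 : i + 1 ≤ pvWordJ cs (i + 1) := pvWordJ_ge cs (i + 1)
  have hcond : cs[i] = '_' ∨ PySem.Chars.isalnum cs[i] = true := by
    rcases hc with hc | hc
    · exact Or.inl hc
    · exact Or.inr (by simp [PySem.Chars.isalnum, hc])
  have he : pvWordJ cs i = pvWordJ cs (i + 1) := by
    conv_lhs => rw [pvWordJ]
    rw [dif_pos h, if_pos hcond]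
  omega

-- outer while loop of A
def pvLoopA (cs : List Char) (i : Nat) : List (String × String) :=
  if h : i < cs.length then
    if cs[i] = '"' then
      ("literal", String.ofList ((cs.drop i).take (pvLitJ cs (i + 1) + 1 - i)))
        :: pvLoopA cs (pvLitJ cs (i + 1) + 1)
    else if cs[i] = ' ' ∨ cs[i] = '\t' then pvLoopA cs (i + 1)
    else if cs[i] = '_' ∨ PySem.Chars.isalpha cs[i] then
      ("ref", String.ofList ((cs.drop i).take (pvWordJ cs i - i))) :: pvLoopA cs (pvWordJ cs i)
    else pvLoopA cs (i + 1)
  else []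
termination_by cs.length - i
decreasing_by
  · have := pvLitJ_ge cs (i + 1); omega
  · omega
  · rename_i hcond
    have := pvWordJ_gt cs i h hcond; omega
  · omega

def tokenize_alt_py (alt : String) : List (String × String) := pvLoopA alt.toList 0

-- ===== PORT B =====
inductive PvSt | top | lit | esc | ref
deriving DecidableEq, Repr

structure PvMS where
  toks : List (String × String)
  buf : List Char
  st : PvSt
deriving DecidableEq, Repr

-- handling of a char in the "top" state (the tail of B's loop body)
def pvStepTop (s : PvMS) (c : Char) : PvMS :=
  if c = '"' then { s with buf := [c], st := .lit }
  else if c = '_' ∨ PySem.Chars.isalpha c then { s with buf := [c], st := .ref }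
  else s

-- B's loop body
def pvStepB (s : PvMS) (c : Char) : PvMS :=
  match s.st with
  | .ref =>
    if c = '_' ∨ PySem.Chars.isalnum c then { s with buf := s.buf ++ [c] }
    else pvStepTop { toks := s.toks ++ [("ref", String.ofList s.buf)], buf := [], st := .top } c
  | .lit =>
    if c = '\\' then { s with buf := s.buf ++ [c], st := .esc }
    else if c = '"' then { toks := s.toks ++ [("literal", String.ofList (s.buf ++ [c]))], buf := [], st := .top }
    else { s with buf := s.buf ++ [c] }
  | .esc => { s with buf := s.buf ++ [c], st := .lit }
  | .top => pvStepTop s c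

-- B's trailing flush
def pvFinish (s : PvMS) : List (String × String) :=
  match s.st with
  | .ref => s.toks ++ [("ref", String.ofList s.buf)]
  | .lit => s.toks ++ [("literal", String.ofList s.buf)]
  | .esc => s.toks ++ [("literal", String.ofList s.buf)]
  | .top => s.toks

def tokenize_alt_py_alt (alt : String) : List (String × String) :=
  pvFinish (alt.toList.foldl pvStepB ⟨[], [], .top⟩)

-- ===== PRECONDITION & SPEC =====
def Spec_tokenize_alt_py (alt : String) (out : List (String × String)) : Prop := out = tokenize_alt_py_alt alt
instance (alt : String) (out : List (String × String)) : Decidable (Spec_tokenize_alt_py alt out) := by unfold Spec_tokenize_alt_py; infer_instance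

-- ===== CLAIM (what is proved, stated in full; the proofs are below) =====
def Claim_equal_tokenize_alt_py : Prop := ∀ (alt : String), Dom_tokenize_alt_py alt → Spec_tokenize_alt_py alt (tokenize_alt_py alt)

theorem pvWord_run (cs : List Char) (j : Nat) (t : List (String × String)) (b : List Char) :
    pvFinish ((cs.drop j).foldl pvStepB ⟨t, b, .ref⟩) =
      if pvWordJ cs j < cs.length
      then pvFinish ((cs.drop (pvWordJ cs j)).foldl pvStepB
            ⟨t ++ [("ref", String.ofList (b ++ (cs.drop j).take (pvWordJ cs j - j)))], [], .top⟩)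
      else t ++ [("ref", String.ofList (b ++ cs.drop j))] := by
  by_cases h : j < cs.length
  · have hd : cs.drop j = cs[j] :: cs.drop (j + 1) := by rw [List.drop_eq_getElem_cons h]
    by_cases hc : cs[j] = '_' ∨ PySem.Chars.isalnum cs[j] = true
    · have hw : pvWordJ cs j = pvWordJ cs (j + 1) := by
        conv_lhs => rw [pvWordJ]
        rw [dif_pos h, if_pos hc]
      have hge : j + 1 ≤ pvWordJ cs (j + 1) := pvWordJ_ge cs (j + 1)
      have hstep : pvStepB ⟨t, b, .ref⟩ cs[j] = ⟨t, b ++ [cs[j]], .ref⟩ := by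
        simp [pvStepB, hc]
      rw [hd, List.foldl_cons, hstep, pvWord_run cs (j + 1) t (b ++ [cs[j]]), hw]
      obtain ⟨k, hk⟩ : ∃ k, pvWordJ cs (j + 1) - j = k + 1 := ⟨pvWordJ cs (j + 1) - (j + 1), by omega⟩
      have hk' : pvWordJ cs (j + 1) - (j + 1) = k := by omega
      rw [hk, hk', List.take_succ_cons]
      simp
    · have hw : pvWordJ cs j = j := by
        conv_lhs => rw [pvWordJ]
        rw [dif_pos h, if_neg hc]
      have hstep : pvStepB ⟨t, b, .ref⟩ cs[j]
          = pvStepB ⟨t ++ [("ref", String.ofList b)], [], .top⟩ cs[j] := by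
        simp [pvStepB, hc]
      rw [hw, if_pos h, hd, List.foldl_cons, List.foldl_cons, hstep]
      simp
  · have hd : cs.drop j = [] := List.drop_eq_nil_of_le (by omega)
    have hw : pvWordJ cs j = j := by rw [pvWordJ, dif_neg h]
    rw [hw, if_neg h, hd]
    simp [pvFinish]
termination_by cs.length - j

theorem pvLit_run (cs : List Char) (j : Nat) (t : List (String × String)) (b : List Char) :
    pvFinish ((cs.drop j).foldl pvStepB ⟨t, b, .lit⟩) =
      if pvLitJ cs j < cs.length
      then pvFinish ((cs.drop (pvLitJ cs j + 1)).foldl pvStepB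
            ⟨t ++ [("literal", String.ofList (b ++ (cs.drop j).take (pvLitJ cs j + 1 - j)))], [], .top⟩)
      else t ++ [("literal", String.ofList (b ++ cs.drop j))] := by
  by_cases h : j < cs.length
  · have hd : cs.drop j = cs[j] :: cs.drop (j + 1) := by rw [List.drop_eq_getElem_cons h]
    by_cases hb : cs[j] = '\\'
    · have hw : pvLitJ cs j = pvLitJ cs (j + 2) := by
        conv_lhs => rw [pvLitJ]
        rw [dif_pos h, if_pos hb]
      have hstep : pvStepB ⟨t, b, .lit⟩ cs[j] = ⟨t, b ++ [cs[j]], .esc⟩ := by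
        simp [pvStepB, hb]
      by_cases h2 : j + 1 < cs.length
      · have hd2 : cs.drop (j + 1) = cs[j + 1] :: cs.drop (j + 2) := by
          rw [List.drop_eq_getElem_cons h2]
        have hstep2 : pvStepB ⟨t, b ++ [cs[j]], .esc⟩ cs[j + 1]
            = ⟨t, (b ++ [cs[j]]) ++ [cs[j + 1]], .lit⟩ := by
          simp [pvStepB]
        have hge : j + 2 ≤ pvLitJ cs (j + 2) := pvLitJ_ge cs (j + 2)
        rw [hd, List.foldl_cons, hstep, hd2, List.foldl_cons, hstep2,
            pvLit_run cs (j + 2) t ((b ++ [cs[j]]) ++ [cs[j + 1]]), hw]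
        obtain ⟨k, hk⟩ : ∃ k, pvLitJ cs (j + 2) + 1 - j = k + 2 :=
          ⟨pvLitJ cs (j + 2) + 1 - (j + 2), by omega⟩
        have hk' : pvLitJ cs (j + 2) + 1 - (j + 1) = k + 1 := by omega
        have hk'' : pvLitJ cs (j + 2) + 1 - (j + 2) = k := by omega
        rw [hk, hk'', List.take_succ_cons]
        simp only [List.take_succ_cons]
        simp
      · have hj2 : cs.drop (j + 1) = [] := List.drop_eq_nil_of_le (by omega)
        have hw2 : pvLitJ cs (j + 2) = j + 2 := by
          rw [pvLitJ, dif_neg (by omega)]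
        rw [hd, List.foldl_cons, hstep, hj2, hw, hw2, if_neg (by omega)]
        simp [pvFinish, hb]
    · by_cases hq : cs[j] = '"'
      · have hw : pvLitJ cs j = j := by
          conv_lhs => rw [pvLitJ]
          rw [dif_pos h, if_neg hb, if_pos hq]
        have hstep : pvStepB ⟨t, b, .lit⟩ cs[j]
            = ⟨t ++ [("literal", String.ofList (b ++ [cs[j]]))], [], .top⟩ := by
          simp [pvStepB, hq]
        rw [hw, if_pos h, hd, List.foldl_cons, hstep]
        have : j + 1 - j = 1 := by omega
        rw [this, List.take_succ_cons, List.take_zero]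
      · have hw : pvLitJ cs j = pvLitJ cs (j + 1) := by
          conv_lhs => rw [pvLitJ]
          rw [dif_pos h, if_neg hb, if_neg hq]
        have hge : j + 1 ≤ pvLitJ cs (j + 1) := pvLitJ_ge cs (j + 1)
        have hstep : pvStepB ⟨t, b, .lit⟩ cs[j] = ⟨t, b ++ [cs[j]], .lit⟩ := by
          simp [pvStepB, hb, hq]
        rw [hd, List.foldl_cons, hstep, pvLit_run cs (j + 1) t (b ++ [cs[j]]), hw]
        obtain ⟨k, hk⟩ : ∃ k, pvLitJ cs (j + 1) + 1 - j = k + 1 :=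
          ⟨pvLitJ cs (j + 1) + 1 - (j + 1), by omega⟩
        have hk' : pvLitJ cs (j + 1) + 1 - (j + 1) = k := by omega
        rw [hk, hk', List.take_succ_cons]
        simp
  · have hd : cs.drop j = [] := List.drop_eq_nil_of_le (by omega)
    have hw : pvLitJ cs j = j := by rw [pvLitJ, dif_neg h]
    rw [hw, if_neg h, hd]
    simp [pvFinish]
termination_by cs.length - j

theorem pvMain (cs : List Char) (i : Nat) (t : List (String × String)) :
    pvFinish ((cs.drop i).foldl pvStepB ⟨t, [], .top⟩) = t ++ pvLoopA cs i := by
  by_cases h : i < cs.length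
  · have hd : cs.drop i = cs[i] :: cs.drop (i + 1) := by rw [List.drop_eq_getElem_cons h]
    conv_rhs => rw [pvLoopA]
    rw [dif_pos h]
    by_cases hq : cs[i] = '"'
    · rw [if_pos hq]
      have hstep : pvStepB ⟨t, [], .top⟩ cs[i] = ⟨t, [cs[i]], .lit⟩ := by
        simp [pvStepB, pvStepTop, hq]
      rw [hd, List.foldl_cons, hstep, pvLit_run cs (i + 1) t [cs[i]]]
      have hge : i + 1 ≤ pvLitJ cs (i + 1) := pvLitJ_ge cs (i + 1)
      by_cases hL : pvLitJ cs (i + 1) < cs.length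
      · rw [if_pos hL, pvMain cs (pvLitJ cs (i + 1) + 1) _]
        obtain ⟨k, hk⟩ : ∃ k, pvLitJ cs (i + 1) + 1 - i = k + 1 :=
          ⟨pvLitJ cs (i + 1) + 1 - (i + 1), by omega⟩
        have hk' : pvLitJ cs (i + 1) + 1 - (i + 1) = k := by omega
        rw [hk, hk', List.take_succ_cons]
        simp
      · rw [if_neg hL]
        have hL2 : pvLoopA cs (pvLitJ cs (i + 1) + 1) = [] := by
          rw [pvLoopA, dif_neg (by omega)]
        have hcl : (cs.drop i).take (pvLitJ cs (i + 1) + 1 - i) = cs.drop i := by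
          apply List.take_of_length_le
          rw [List.length_drop]
          omega
        rw [hL2, ← hd, hcl, hd]
        simp
    · rw [if_neg hq]
      by_cases hs : cs[i] = ' ' ∨ cs[i] = '\t'
      · rw [if_pos hs]
        have hna : ¬(cs[i] = '_' ∨ PySem.Chars.isalpha cs[i] = true) := by
          rcases hs with h' | h' <;> rw [h'] <;> decide
        have hstep : pvStepB ⟨t, [], .top⟩ cs[i] = ⟨t, [], .top⟩ := by
          simp [pvStepB, pvStepTop, hq, hna]
        rw [hd, List.foldl_cons, hstep, pvMain cs (i + 1) t]
      · rw [if_neg hs]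
        by_cases ha : cs[i] = '_' ∨ PySem.Chars.isalpha cs[i] = true
        · rw [if_pos ha]
          have hstep : pvStepB ⟨t, [], .top⟩ cs[i] = ⟨t, [cs[i]], .ref⟩ := by
            simp [pvStepB, pvStepTop, hq, ha]
          have hcond : cs[i] = '_' ∨ PySem.Chars.isalnum cs[i] = true := by
            rcases ha with h' | h'
            · exact Or.inl h'
            · exact Or.inr (by simp [PySem.Chars.isalnum, h'])
          have hw : pvWordJ cs i = pvWordJ cs (i + 1) := by
            conv_lhs => rw [pvWordJ]
            rw [dif_pos h, if_pos hcond]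
          have hge : i + 1 ≤ pvWordJ cs (i + 1) := pvWordJ_ge cs (i + 1)
          rw [hd, List.foldl_cons, hstep, pvWord_run cs (i + 1) t [cs[i]], hw]
          by_cases hW : pvWordJ cs (i + 1) < cs.length
          · rw [if_pos hW, pvMain cs (pvWordJ cs (i + 1)) _]
            obtain ⟨k, hk⟩ : ∃ k, pvWordJ cs (i + 1) - i = k + 1 :=
              ⟨pvWordJ cs (i + 1) - (i + 1), by omega⟩
            have hk' : pvWordJ cs (i + 1) - (i + 1) = k := by omega
            rw [hk, hk', List.take_succ_cons]
            simp
          · rw [if_neg hW]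
            have hW2 : pvLoopA cs (pvWordJ cs (i + 1)) = [] := by
              rw [pvLoopA, dif_neg (by omega)]
            have hcl : (cs.drop i).take (pvWordJ cs (i + 1) - i) = cs.drop i := by
              apply List.take_of_length_le
              rw [List.length_drop]
              omega
            rw [hW2, ← hd, hcl, hd]
            simp
        · rw [if_neg ha]
          have hstep : pvStepB ⟨t, [], .top⟩ cs[i] = ⟨t, [], .top⟩ := by
            simp [pvStepB, pvStepTop, hq, ha]
          rw [hd, List.foldl_cons, hstep, pvMain cs (i + 1) t]
  · have hd : cs.drop i = [] := List.drop_eq_nil_of_le (by omega)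
    have hL : pvLoopA cs i = [] := by rw [pvLoopA, dif_neg h]
    rw [hd, hL]
    simp [pvFinish]
termination_by cs.length - i

-- ===== VERDICT (by name: the statement is the Claim_ definition above) =====
theorem tokenize_alt_py_spec : Claim_equal_tokenize_alt_py := by
  intro alt _
  unfold Spec_tokenize_alt_py tokenize_alt_py tokenize_alt_py_alt
  simpa using (pvMain alt.toList 0 []).symm
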